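-- pv_equiv track=rewrite | github.com/raininboat/rainydice | dice_command/public_deck.py | sqlEscape
-- ===== SOURCE A (Python) =====
-- escapedict = {
--     "'" : '&#39;',
--     '"' : '&#34;',
--     '|' : '&#124;'
-- }
--
-- def sqlEscape(datalist:list):
--     '将列表内容转化为字符串用于sql存储'
--     if datalist == [] :
--         return ''
--     cardesclist = []
--     def escape(string:str):
--         string = string.replace('&','&amp;')
--         for raw,esc in escapedict.items():
--             string = string.replace(raw,esc)
--         return string
--     for thiscard in datalist:
--         cardesclist.append(escape(thiscard))
--     strCardAll = '|'.join(cardesclist)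
--     return strCardAll
-- ===== SOURCE B (Python) =====
-- _ESC = {'&': '&amp;', "'": '&#39;', '"': '&#34;', '|': '&#124;'}
--
-- def sqlEscape(datalist: list):
--     '将列表内容转化为字符串用于sql存储'
--     out = []
--     sep = ''
--     for s in datalist:
--         out.append(sep)
--         sep = '|'
--         for c in s:
--             out.append(_ESC.get(c, c))
--     return ''.join(out)
-- ===== Notes on version B (the rewrite author's own statement) =====
-- stated objective: alternative
-- what changed: Replaces A's staged pipeline (four sequential full-string str.replace scans per element, an intermediate list of escaped strings, then a '|'.join) with one fused loop that walks every character of every string exactly once, emitting per-character escapes and the separator into a single piece accumulator joined once at the end; valid because no escape output contains a trigger character.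
import Mathlib
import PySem

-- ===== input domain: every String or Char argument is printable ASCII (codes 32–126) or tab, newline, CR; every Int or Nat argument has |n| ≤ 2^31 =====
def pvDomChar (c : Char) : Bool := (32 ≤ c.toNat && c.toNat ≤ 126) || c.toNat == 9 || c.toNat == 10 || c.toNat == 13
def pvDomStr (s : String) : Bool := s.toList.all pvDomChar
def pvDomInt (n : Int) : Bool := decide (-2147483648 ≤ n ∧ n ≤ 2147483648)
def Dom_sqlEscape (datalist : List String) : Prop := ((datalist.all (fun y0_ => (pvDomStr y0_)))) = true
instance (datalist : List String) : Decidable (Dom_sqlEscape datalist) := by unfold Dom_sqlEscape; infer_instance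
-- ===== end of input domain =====

-- B fuses A's staged pipeline (four str.replace scans per element, an intermediate escaped
-- list, then '|'.join) into one loop over every character, emitting escapes and separators
-- into a single piece accumulator joined once at the end (alternative; return value only).


-- ===== PORT A =====
-- module-level dict escapedict (dict -> association list in insertion order)
def escapedict : List (String × String) := [("'", "&#39;"), ("\"", "&#34;"), ("|", "&#124;")]

-- inner helper 'escape': string.replace('&','&amp;') then a loop over escapedict.items()
def escapeA (string : String) : String :=
  escapedict.foldl (fun s p => PySem.Str.replace s p.1 p.2) (PySem.Str.replace string "&" "&amp;")

def sqlEscape (datalist : List String) : String :=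
  if datalist = [] then ""
  else
    let cardesclist := datalist.foldl (fun acc thiscard => acc ++ [escapeA thiscard]) []
    PySem.Str.join "|" cardesclist

-- ===== PORT B =====
-- module-level dict _ESC
def escDict : List (Char × String) := [('&', "&amp;"), ('\'', "&#39;"), ('"', "&#34;"), ('|', "&#124;")]

-- _ESC.get(c, c)
def escGet (c : Char) : String :=
  ((escDict.find? (fun p => p.1 == c)).map Prod.snd).getD (String.singleton c)

-- fused loop: state = (out pieces, current separator); final ''.join(out)
def sqlEscape_alt (datalist : List String) : String :=
  let st := datalist.foldl
    (fun (p : List String × String) s =>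
      (s.toList.foldl (fun acc c => acc ++ [escGet c]) (p.1 ++ [p.2]), "|"))
    ([], "")
  PySem.Str.join "" st.1

-- ===== PRECONDITION & SPEC =====
def Spec_sqlEscape (datalist : List String) (out : String) : Prop := out = sqlEscape_alt datalist
instance (datalist : List String) (out : String) : Decidable (Spec_sqlEscape datalist out) := by unfold Spec_sqlEscape; infer_instance

-- ===== CLAIM (what is proved, stated in full; the proofs are below) =====
def Claim_equal_sqlEscape : Prop := ∀ (datalist : List String), Dom_sqlEscape datalist → Spec_sqlEscape datalist (sqlEscape datalist)

-- ===== LEMMAS AND PROOFS =====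

-- the per-character escape, as a List Char function
def escCharL (c : Char) : List Char :=
  if c = '&' then "&amp;".toList
  else if c = '\'' then "&#39;".toList
  else if c = '"' then "&#34;".toList
  else if c = '|' then "&#124;".toList
  else [c]

theorem escGet_toList (c : Char) : (escGet c).toList = escCharL c := by
  by_cases h1 : c = '&'
  · subst h1; decide
  by_cases h2 : c = '\''
  · subst h2; decide
  by_cases h3 : c = '"'
  · subst h3; decide
  by_cases h4 : c = '|'
  · subst h4; decide
  have e1 : ('&' == c) = false := by simp; exact fun h => h1 h.symm
  have e2 : ('\'' == c) = false := by simp; exact fun h => h2 h.symm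
  have e3 : ('"' == c) = false := by simp; exact fun h => h3 h.symm
  have e4 : ('|' == c) = false := by simp; exact fun h => h4 h.symm
  simp [escGet, escDict, escCharL, List.find?, e1, e2, e3, e4, h1, h2, h3, h4]

-- single-character replace is a per-character flatMap
theorem replace_go_single (c0 : Char) (new : List Char) :
    ∀ (l acc : List Char), PySem.Chars.replace.go [c0] new l.length l acc
      = acc.reverse ++ l.flatMap (fun c => if c = c0 then new else [c]) := by
  intro l
  induction l with
  | nil => intro acc; simp [PySem.Chars.replace.go]
  | cons c t ih =>
    intro acc
    show PySem.Chars.replace.go [c0] new (t.length + 1) (c :: t) acc = _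
    rw [PySem.Chars.replace.go]
    by_cases hc : c = c0
    · simp [hc, List.isPrefixOf, ih]
    · have : [c0].isPrefixOf (c :: t) = false := by
        simp [List.isPrefixOf]; exact fun h => hc h.symm
      simp [this, ih, hc]

theorem replace_single (cs : List Char) (c0 : Char) (new : List Char) :
    PySem.Chars.replace cs [c0] new = cs.flatMap (fun c => if c = c0 then new else [c]) := by
  rw [PySem.Chars.replace]
  simp [replace_go_single]

-- A's four sequential replaces are one per-character flatMap
theorem escapeA_toList (s : String) :
    (escapeA s).toList = s.toList.flatMap escCharL := by
  have h : ∀ (cs : List Char),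
      PySem.Chars.replace (PySem.Chars.replace (PySem.Chars.replace
        (PySem.Chars.replace cs ['&'] "&amp;".toList) ['\''] "&#39;".toList)
        ['"'] "&#34;".toList) ['|'] "&#124;".toList = cs.flatMap escCharL := by
    intro cs
    simp only [replace_single, List.flatMap_assoc]
    refine List.flatMap_congr (fun c _ => ?_)
    by_cases h1 : c = '&' <;> by_cases h2 : c = '\'' <;> by_cases h3 : c = '"' <;>
      by_cases h4 : c = '|' <;> simp_all [escCharL]
  simp only [escapeA, escapedict, List.foldl]
  simp only [PySem.Str.replace, String.toList_ofList]
  exact h s.toList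

theorem foldl_append_eq_map {α β : Type} (f : α → β) :
    ∀ (xs : List α) (acc : List β),
      xs.foldl (fun acc t => acc ++ [f t]) acc = acc ++ xs.map f := by
  intro xs
  induction xs with
  | nil => simp
  | cons x t ih => intro acc; simp [ih]

-- B's outer fold, characterized: pieces accumulated, separator becomes "|"
theorem altFold_char :
    ∀ (xs : List String) (out : List String),
      xs.foldl (fun (p : List String × String) s =>
          (s.toList.foldl (fun acc c => acc ++ [escGet c]) (p.1 ++ [p.2]), "|")) (out, "|")
        = (out ++ xs.flatMap (fun s => "|" :: s.toList.map escGet), "|") := by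
  intro xs
  induction xs with
  | nil => simp
  | cons x t ih =>
    intro out
    rw [List.foldl_cons, foldl_append_eq_map escGet, ih]
    simp

-- join [] is flatten (on Chars)
theorem joinNil_flatten : ∀ (parts : List (List Char)),
    PySem.Chars.join [] parts = parts.flatten := by
  intro parts
  induction parts with
  | nil => simp [PySem.Chars.join_nil]
  | cons a t ih =>
    cases t with
    | nil => simp [PySem.Chars.join_singleton]
    | cons b u => rw [PySem.Chars.join_cons_cons]; simp [ih]

-- join "|" over escaped strings equals the flattened fused pieces
theorem joinBar_char (E : String → List Char) :
    ∀ (x : String) (xs : List String),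
      PySem.Chars.join ['|'] ((x :: xs).map E)
        = E x ++ (xs.map E).flatMap (fun e => '|' :: e) := by
  intro x xs
  induction xs generalizing x with
  | nil => simp [PySem.Chars.join_singleton]
  | cons b u ih =>
    rw [List.map_cons, List.map_cons, PySem.Chars.join_cons_cons, ← List.map_cons, ih b]
    simp

-- the tail of the fused pieces flattens to A's separated tail
theorem tail_flat : ∀ (u : List String),
    List.flatMap (fun e => '|' :: e) (List.map (fun s => (escapeA s).toList) u)
      = (List.flatMap (fun s => ['|'] :: List.map (fun c => escCharL c) s.toList) u).flatten := by
  intro u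
  induction u with
  | nil => simp
  | cons b t ih =>
    simp only [List.map_cons, List.flatMap_cons, List.flatten_append]
    rw [ih]
    simp [escapeA_toList, List.flatMap_def]

-- ===== VERDICT (by name: the statement is the Claim_ definition above) =====
theorem sqlEscape_spec : Claim_equal_sqlEscape := by
  intro datalist _
  unfold Spec_sqlEscape sqlEscape sqlEscape_alt
  cases datalist with
  | nil => decide
  | cons x xs =>
    rw [if_neg (List.cons_ne_nil x xs)]
    rw [foldl_append_eq_map escapeA, List.foldl_cons, foldl_append_eq_map escGet,
      altFold_char xs]
    simp only [List.nil_append]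
    apply String.toList_injective
    rw [PySem.Str.toList_join, PySem.Str.toList_join]
    have hbar : "|".toList = ['|'] := rfl
    have hnil : "".toList = ([] : List Char) := rfl
    rw [hbar, hnil, List.map_map]
    simp only [Function.comp_def]
    rw [joinBar_char (fun s => (escapeA s).toList) x xs]
    simp only [List.cons_append, List.nil_append]
    have hpieces : (("" :: (x.toList.map escGet ++
        xs.flatMap (fun s => "|" :: s.toList.map escGet))).map String.toList)
        = [] :: (x.toList.map (fun c => escCharL c) ++
            xs.flatMap (fun s => ['|'] :: s.toList.map (fun c => escCharL c))) := by
      simp [List.map_map, Function.comp_def, escGet_toList, List.map_flatMap]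
    rw [hpieces, joinNil_flatten]
    simp only [List.flatten_cons, List.nil_append, List.flatten_append]
    rw [escapeA_toList]
    congr 1
    exact tail_flat xs
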